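-- pv_equiv track=rewrite | github.com/listenzcc/parse_pdfs_for_manager | Experimental Scripts/pdf_parser.py | str_filter
-- ===== SOURCE A (Python) =====
-- import unicodedata
--
-- def str_filter(raw):
--     normalized = unicodedata.normalize('NFKC', raw)
--     changed = ''.join(c for c in normalized if unicodedata.category(c) in
--                       ['Ll', 'Lu', 'Zs', 'Po', 'Ps', 'Pe', 'Cc'])
--     for c in ['(', ')', '\n', ':']:
--         changed = changed.replace(c, ',')
--     out = [e.strip().lower() for e in changed.split(',') if len(e) > 0]
--     return out
-- ===== SOURCE B (Python) =====
-- import unicodedata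
--
-- _ALLOWED = {'Ll', 'Lu', 'Zs', 'Po', 'Ps', 'Pe', 'Cc'}
-- _DELIMS = {'(', ')', '\n', ':', ','}
--
-- def str_filter(raw):
--     tokens = []
--     buf = []
--     for c in unicodedata.normalize('NFKC', raw):
--         if unicodedata.category(c) not in _ALLOWED:
--             continue
--         if c in _DELIMS:
--             tokens.append(''.join(buf))
--             buf = []
--         else:
--             buf.append(c)
--     tokens.append(''.join(buf))
--     return [t.strip().lower() for t in tokens if t]
-- ===== Notes on version B (the rewrite author's own statement) =====
-- stated objective: alternative
-- what changed: A builds the whole filtered string, then rewrites it with four successive str.replace passes and splits on the comma character; B fuses everything into a single pass over the NFKC-normalized characters, maintaining a token list and a current buffer, flushing the buffer at every allowed delimiter character.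
import Mathlib
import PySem

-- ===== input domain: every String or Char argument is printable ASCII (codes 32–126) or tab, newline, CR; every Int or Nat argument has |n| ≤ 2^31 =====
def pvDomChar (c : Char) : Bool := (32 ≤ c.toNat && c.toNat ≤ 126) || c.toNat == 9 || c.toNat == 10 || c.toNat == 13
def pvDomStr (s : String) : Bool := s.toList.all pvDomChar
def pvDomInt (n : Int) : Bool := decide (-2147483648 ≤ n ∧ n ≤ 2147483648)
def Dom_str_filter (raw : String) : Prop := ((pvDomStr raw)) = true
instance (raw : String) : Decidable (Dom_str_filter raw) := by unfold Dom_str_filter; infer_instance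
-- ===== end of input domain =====

-- B fuses A's filter / four replaces / split pipeline into one pass over the characters (objective: alternative decomposition, same asymptotic cost).
-- Both ports model unicodedata.normalize('NFKC', ·) as the identity and unicodedata.category via the table pvCat below; both are exact on
-- Dom_str_filter (printable ASCII plus tab/newline/CR), where NFKC is the identity and pvCat is the real Unicode category.

-- ===== PORT A =====
-- unicodedata.category c for ASCII (codes < 128); exact on Dom_str_filter (and on all C0 controls). Used by both ports, as both Pythons call it.
def pvCat (c : Char) : String :=
  if 'a' ≤ c ∧ c ≤ 'z' then "Ll"
  else if 'A' ≤ c ∧ c ≤ 'Z' then "Lu"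
  else if c = ' ' then "Zs"
  else if c ∈ ['!', '"', '#', '%', '&', '\'', '*', ',', '.', '/', ':', ';', '?', '@', '\\'] then "Po"
  else if c ∈ ['(', '[', '{'] then "Ps"
  else if c ∈ [')', ']', '}'] then "Pe"
  else if c.toNat < 32 ∨ c.toNat = 127 then "Cc"
  else if '0' ≤ c ∧ c ≤ '9' then "Nd"
  else if c = '$' then "Sc"
  else if c ∈ ['+', '<', '=', '>', '|', '~'] then "Sm"
  else if c = '-' then "Pd"
  else if c ∈ ['^', '`'] then "Sk"
  else if c = '_' then "Pc"
  else ""  -- non-ASCII: outside Dom_str_filter, unmodelled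

def str_filter (raw : String) : List String :=
  -- normalized = unicodedata.normalize('NFKC', raw): identity on Dom_str_filter, ported as identity
  let normalized := raw.toList
  let changed := normalized.filter (fun c => ["Ll", "Lu", "Zs", "Po", "Ps", "Pe", "Cc"].contains (pvCat c))
  let changed := ['(', ')', '\n', ':'].foldl (fun s c => PySem.Chars.replace s [c] [',']) changed
  ((PySem.Chars.splitOn changed [',']).filter (fun e => PySem.Chars.len e > 0)).map
    (fun e => String.ofList (PySem.Chars.lower (PySem.Chars.strip e)))

-- ===== PORT B =====
def pvAllowedCats : PySem.Set String := PySem.Set.ofList ["Ll", "Lu", "Zs", "Po", "Ps", "Pe", "Cc"]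
def pvDelims : PySem.Set Char := PySem.Set.ofList ['(', ')', '\n', ':', ',']

-- the body of B's single for-loop
def pvStep (st : List (List Char) × List Char) (c : Char) : List (List Char) × List Char :=
  if ¬ PySem.Set.contains pvAllowedCats (pvCat c) then st
  else if PySem.Set.contains pvDelims c then (st.1 ++ [st.2], [])
  else (st.1, st.2 ++ [c])

def str_filter_alt (raw : String) : List String :=
  -- unicodedata.normalize('NFKC', raw): identity on Dom_str_filter, ported as identity
  let st := raw.toList.foldl pvStep ([], [])
  let tokens := st.1 ++ [st.2]
  (tokens.filter (fun t => !t.isEmpty)).map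
    (fun t => String.ofList (PySem.Chars.lower (PySem.Chars.strip t)))

-- ===== PRECONDITION & SPEC =====
def Spec_str_filter (raw : String) (out : List String) : Prop := out = str_filter_alt raw
instance (raw : String) (out : List String) : Decidable (Spec_str_filter raw out) := by unfold Spec_str_filter; infer_instance

-- ===== CLAIM (what is proved, stated in full; the proofs are below) =====
def Claim_equal_str_filter : Prop := ∀ (raw : String), Dom_str_filter raw → Spec_str_filter raw (str_filter raw)

-- ===== LEMMAS AND PROOFS =====

-- the character substitution carried out by A's four successive str.replace calls
def pvSubst (c : Char) : Char :=
  if c = '(' then ',' else if c = ')' then ',' else if c = '\n' then ',' else if c = ':' then ',' else c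

-- the allowed-category test (shared by both ports, phrased as A phrases it)
def pvAllowed (c : Char) : Bool := ["Ll", "Lu", "Zs", "Po", "Ps", "Pe", "Cc"].contains (pvCat c)

-- what the A-pipeline's string looks like just before split(',')
def pvProc (cs : List Char) : List Char := (cs.filter pvAllowed).map pvSubst

-- simple structural model of s.split(',')
def pvConsHead (pre : List Char) : List (List Char) → List (List Char)
  | [] => [pre]
  | p :: ps => (pre ++ p) :: ps

def pvSplit : List Char → List (List Char)
  | [] => [[]]
  | c :: t => if c = ',' then [] :: pvSplit t else pvConsHead [c] (pvSplit t)

theorem pvSplit_ne_nil (l : List Char) : pvSplit l ≠ [] := by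
  cases l with
  | nil => simp [pvSplit]
  | cons c t =>
    simp only [pvSplit]
    split
    · simp
    · cases h : pvSplit t <;> simp [pvConsHead]

theorem pvConsHead_nil (ps : List (List Char)) (h : ps ≠ []) : pvConsHead [] ps = ps := by
  cases ps with
  | nil => exact absurd rfl h
  | cons p ps => simp [pvConsHead]

theorem pvConsHead_consHead (a b : List Char) (ps : List (List Char)) :
    pvConsHead a (pvConsHead b ps) = pvConsHead (a ++ b) ps := by
  cases ps <;> simp [pvConsHead]

-- replace with a single-char pattern is a pointwise map
theorem pvReplace_go (a b : Char) (l : List Char) (fuel : Nat) (acc : List Char)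
    (h : l.length ≤ fuel) :
    PySem.Chars.replace.go [a] [b] fuel l acc
      = acc.reverse ++ l.map (fun c => if c = a then b else c) := by
  induction l generalizing fuel acc with
  | nil => cases fuel <;> simp [PySem.Chars.replace.go]
  | cons c t ih =>
    cases fuel with
    | zero => simp at h
    | succ f =>
      simp only [PySem.Chars.replace.go, List.isPrefixOf, List.map]
      by_cases hc : c = a
      · simp only [hc, beq_self_eq_true, Bool.true_and, if_pos, List.length_singleton, List.drop_succ_cons, List.drop_zero,
          List.reverse_singleton, List.singleton_append]
        rw [ih f (b :: acc) (by simpa using Nat.le_of_succ_le_succ h)]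
        simp
      · have : (a == c) = false := by simp [Ne.symm hc]
        simp only [this, Bool.false_and, Bool.false_eq_true, if_false]
        rw [ih f (c :: acc) (by simpa using Nat.le_of_succ_le_succ h)]
        simp [hc]

theorem pvReplace_single (a b : Char) (l : List Char) :
    PySem.Chars.replace l [a] [b] = l.map (fun c => if c = a then b else c) := by
  simpa using pvReplace_go a b l l.length [] (le_refl _)

-- the composition of the four replaces is pvSubst
theorem pvSubst_comp (c : Char) :
    (if (if (if (if c = '(' then ',' else c) = ')' then ','
          else if c = '(' then ',' else c) = '\n' then ','
        else if (if c = '(' then ',' else c) = ')' then ','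
          else if c = '(' then ',' else c) = ':' then ','
      else if (if (if c = '(' then ',' else c) = ')' then ','
          else if c = '(' then ',' else c) = '\n' then ','
        else if (if c = '(' then ',' else c) = ')' then ','
          else if c = '(' then ',' else c) = pvSubst c := by
  unfold pvSubst
  split_ifs <;> simp_all

theorem pvFourReplaces (l : List Char) :
    ['(', ')', '\n', ':'].foldl (fun s c => PySem.Chars.replace s [c] [',']) l
      = l.map pvSubst := by
  simp only [List.foldl, pvReplace_single, List.map_map]
  refine List.map_congr_left (fun c _ => ?_)
  simpa using pvSubst_comp c

-- splitOn by ',' is pvSplit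
theorem pvSplitOn_go (l cur : List Char) (accs : List (List Char)) (fuel : Nat)
    (h : l.length ≤ fuel) :
    PySem.Chars.splitOn.go [','] fuel l cur accs
      = accs.reverse ++ pvConsHead cur.reverse (pvSplit l) := by
  induction l generalizing fuel cur accs with
  | nil => cases fuel <;> simp [PySem.Chars.splitOn.go, pvSplit, pvConsHead]
  | cons c t ih =>
    cases fuel with
    | zero => simp at h
    | succ f =>
      simp only [PySem.Chars.splitOn.go, List.isPrefixOf]
      by_cases hc : c = ','
      · have hb : (',' == c) = true := by simp [hc]
        simp only [hb, Bool.true_and, if_pos, List.length_cons, List.drop_succ_cons, List.length_nil,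
          List.drop_zero]
        rw [ih [] (cur.reverse :: accs) f (by simpa using Nat.le_of_succ_le_succ h)]
        simp only [List.reverse_nil]
        rw [pvConsHead_nil _ (pvSplit_ne_nil t)]
        simp [pvSplit, hc, pvConsHead]
      · have hb : (',' == c) = false := by simp [Ne.symm hc]
        simp only [hb, Bool.false_and, Bool.false_eq_true, if_false]
        rw [ih (c :: cur) accs f (by simpa using Nat.le_of_succ_le_succ h)]
        simp [pvSplit, hc, pvConsHead_consHead]

theorem pvSplitOn_comma (l : List Char) :
    PySem.Chars.splitOn l [','] = pvSplit l := by
  unfold PySem.Chars.splitOn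
  rw [pvSplitOn_go l [] [] (l.length + 1) (by omega)]
  simp [pvConsHead_nil _ (pvSplit_ne_nil l)]

-- B's tests agree with A's
theorem pvAllowed_eq (s : String) :
    PySem.Set.contains pvAllowedCats s = ["Ll", "Lu", "Zs", "Po", "Ps", "Pe", "Cc"].contains s := by
  rfl

theorem pvSubst_of_delim (c : Char) (h : PySem.Set.contains pvDelims c = true) :
    pvSubst c = ',' := by
  have : c = '(' ∨ c = ')' ∨ c = '\n' ∨ c = ':' ∨ c = ',' := by
    revert h; simp [pvDelims, PySem.Set.contains, PySem.Set.ofList, PySem.Set.add]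
  unfold pvSubst
  rcases this with h | h | h | h | h <;> simp [h]

theorem pvSubst_of_not_delim (c : Char) (h : PySem.Set.contains pvDelims c = false) :
    pvSubst c = c ∧ c ≠ ',' := by
  have : ¬ (c = '(' ∨ c = ')' ∨ c = '\n' ∨ c = ':' ∨ c = ',') := by
    revert h; simp [pvDelims, PySem.Set.contains, PySem.Set.ofList, PySem.Set.add]
  push Not at this
  obtain ⟨h1, h2, h3, h4, h5⟩ := this
  exact ⟨by simp [pvSubst, h1, h2, h3, h4], h5⟩

-- the loop invariant: B's fold computes A's split
theorem pvFold_split (cs : List Char) (tokens : List (List Char)) (buf : List Char) :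
    (cs.foldl pvStep (tokens, buf)).1 ++ [(cs.foldl pvStep (tokens, buf)).2]
      = tokens ++ pvConsHead buf (pvSplit (pvProc cs)) := by
  induction cs generalizing tokens buf with
  | nil => simp [pvProc, pvSplit, pvConsHead]
  | cons c t ih =>
    simp only [List.foldl_cons, pvStep]
    by_cases ha : pvAllowed c
    · have ha' : PySem.Set.contains pvAllowedCats (pvCat c) = true := by
        rw [pvAllowed_eq]; exact ha
      simp only [ha', not_true_eq_false, if_false]
      by_cases hd : PySem.Set.contains pvDelims c = true
      · simp only [hd, if_true]
        rw [ih (tokens ++ [buf]) []]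
        have hsub := pvSubst_of_delim c hd
        have hp : pvProc (c :: t) = ',' :: pvProc t := by simp [pvProc, ha, hsub]
        rw [hp, pvConsHead_nil _ (pvSplit_ne_nil _)]
        simp [pvSplit, pvConsHead]
      · simp only [eq_false_of_ne_true hd, Bool.false_eq_true, if_false]
        rw [ih tokens (buf ++ [c])]
        obtain ⟨hsub, hne⟩ := pvSubst_of_not_delim c (eq_false_of_ne_true hd)
        have hp : pvProc (c :: t) = c :: pvProc t := by simp [pvProc, ha, hsub]
        rw [hp]
        simp [pvSplit, hne, pvConsHead_consHead]
    · have ha' : PySem.Set.contains pvAllowedCats (pvCat c) = false := by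
        rw [pvAllowed_eq]; exact eq_false_of_ne_true ha
      simp only [ha', not_false_eq_true, if_true, Bool.false_eq_true]
      rw [ih]
      simp [pvProc, ha]

theorem pvFilter_eq (l : List (List Char)) :
    l.filter (fun e => PySem.Chars.len e > 0) = l.filter (fun t => !t.isEmpty) := by
  refine List.filter_congr (fun e _ => ?_)
  cases e <;> simp [PySem.Chars.len]

-- ===== VERDICT (by name: the statement is the Claim_ definition above) =====
theorem str_filter_spec : Claim_equal_str_filter := by
  intro raw _
  show str_filter raw = str_filter_alt raw
  unfold str_filter str_filter_alt
  simp only [pvFourReplaces, pvSplitOn_comma]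
  have h := pvFold_split raw.toList [] []
  simp only [List.nil_append] at h
  rw [show (fun c => ["Ll", "Lu", "Zs", "Po", "Ps", "Pe", "Cc"].contains (pvCat c)) = pvAllowed
        from rfl]
  rw [show (raw.toList.filter pvAllowed).map pvSubst = pvProc raw.toList from rfl]
  rw [h, pvConsHead_nil _ (pvSplit_ne_nil _), pvFilter_eq]
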